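-- pv_equiv track=rewrite | github.com/ArpitPrd/PathPlanning | python_model/battery_model.py | classify_motion_timeline
-- ===== SOURCE A (Python) =====
-- def _heading(p_from, p_to):
--     """Grid step (dr, dc); (0,0) means no move."""
--     return (int(p_to[0] - p_from[0]), int(p_to[1] - p_from[1]))
--
-- def classify_motion_timeline(timeline):
--     """
--     For t=1..T, label each step as 'steady' / 'straight' / 'turn'.
--     Returns list[str] length T.
--     """
--     T = len(timeline) - 1
--     labels = []
--     for t in range(1, T + 1):
--         p_prev = timeline[t-1]
--         p_curr = timeline[t]
--         moved = (p_curr[0] != p_prev[0]) or (p_curr[1] != p_prev[1])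
--         if not moved:
--             labels.append('steady')
--             continue
--
--         h_now = _heading(p_prev, p_curr)
--         if t - 1 >= 1:
--             p_prev2 = timeline[t-2]
--             moved_prev = (p_prev[0] != p_prev2[0]) or (p_prev[1] != p_prev2[1])
--             if moved_prev:
--                 h_prev = _heading(p_prev2, p_prev)
--                 labels.append('turn' if (h_prev != (0,0) and h_now != (0,0) and h_prev != h_now) else 'straight')
--             else:
--                 labels.append('straight')  # first move after steady
--         else:
--             labels.append('straight')      # first step has no prior heading
--     return labels
-- ===== SOURCE B (Python) =====
-- def classify_motion_timeline(timeline):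
--     # Run-length encode the heading sequence into maximal runs, then emit
--     # labels per run: a (0,0)-run is all 'steady'; a moving run is 'straight's
--     # except its first label, which is 'turn' iff the previous run moved.
--     hs = [(b[0] - a[0], b[1] - a[1]) for a, b in zip(timeline, timeline[1:])]
--     runs = []
--     while hs:
--         h = hs[0]
--         n = 1
--         while n < len(hs) and hs[n] == h:
--             n += 1
--         runs.append((h, n))
--         hs = hs[n:]
--     labels = []
--     prev = None
--     for h, n in runs:
--         if h == (0, 0):
--             labels.extend(['steady'] * n)
--         else:
--             labels.append('turn' if prev is not None and prev != (0, 0) else 'straight')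
--             labels.extend(['straight'] * (n - 1))
--         prev = h
--     return labels
-- ===== Notes on version B (the rewrite author's own statement) =====
-- stated objective: alternative
-- what changed: B run-length encodes the heading sequence into maximal runs and emits labels per run (a (0,0)-run is all 'steady'; a moving run is 'straight' except its first label, 'turn' iff the previous run moved), instead of A's per-step comparison of three consecutive positions.
import Mathlib
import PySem

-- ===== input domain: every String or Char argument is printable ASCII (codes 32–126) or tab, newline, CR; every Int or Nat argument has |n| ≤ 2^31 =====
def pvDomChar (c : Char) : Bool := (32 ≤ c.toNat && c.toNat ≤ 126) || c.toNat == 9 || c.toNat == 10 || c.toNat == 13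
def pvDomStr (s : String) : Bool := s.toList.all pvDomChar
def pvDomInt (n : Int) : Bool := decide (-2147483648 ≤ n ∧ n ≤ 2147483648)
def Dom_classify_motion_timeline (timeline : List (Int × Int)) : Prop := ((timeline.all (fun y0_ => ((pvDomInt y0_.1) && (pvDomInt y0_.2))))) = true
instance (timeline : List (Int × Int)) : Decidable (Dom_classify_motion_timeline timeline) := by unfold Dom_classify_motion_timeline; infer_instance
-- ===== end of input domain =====

-- B run-length encodes the heading sequence into maximal runs and emits labels
-- per run, instead of A's per-step comparison of three consecutive positions
-- (alternative decomposition, same O(n) cost).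

-- ===== PORT A =====
def pvHeading (p_from p_to : Int × Int) : Int × Int :=
  (p_to.1 - p_from.1, p_to.2 - p_from.2)

def classify_motion_timeline (timeline : List (Int × Int)) : List String :=
  let T : Int := (timeline.length : Int) - 1
  (PySem.List.pyRange 1 (T + 1) 1).foldl (fun labels t =>
    match PySem.List.pyGet? timeline (t - 1), PySem.List.pyGet? timeline t with
    | some p_prev, some p_curr =>
      if p_curr.1 != p_prev.1 || p_curr.2 != p_prev.2 then
        let h_now := pvHeading p_prev p_curr
        if t - 1 ≥ 1 then
          match PySem.List.pyGet? timeline (t - 2) with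
          | some p_prev2 =>
            if p_prev.1 != p_prev2.1 || p_prev.2 != p_prev2.2 then
              let h_prev := pvHeading p_prev2 p_prev
              labels ++ [if h_prev != ((0 : Int), (0 : Int)) && h_now != ((0 : Int), (0 : Int)) && h_prev != h_now then "turn" else "straight"]
            else labels ++ ["straight"]
          | none => labels
        else labels ++ ["straight"]
      else labels ++ ["steady"]
    | _, _ => labels) []

-- ===== PORT B =====
-- hs = [(b0-a0, b1-a1) for (a,b) in zip(timeline, timeline[1:])]
def pvHeadings : List (Int × Int) → List (Int × Int)
  | a :: b :: rest => (b.1 - a.1, b.2 - a.2) :: pvHeadings (b :: rest)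
  | _ => []

-- the 'while hs:' run-length-encoding loop of Source B (the inner counting 'while'
-- is the scan that takeWhile performs; 'hs = hs[n:]' is the dropWhile)
def pvRle : List (Int × Int) → List ((Int × Int) × Nat)
  | [] => []
  | h :: rest =>
    (h, 1 + (rest.takeWhile (· == h)).length) :: pvRle (rest.dropWhile (· == h))
termination_by l => l.length
decreasing_by
  simpa [Nat.lt_succ_iff] using List.length_dropWhile_le (· == h) rest

-- the 'for h, n in runs:' emission loop of Source B (prev threaded through)
def pvEmit (prev : Option (Int × Int)) : List ((Int × Int) × Nat) → List String
  | [] => []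
  | (h, n) :: rest =>
    (if h = ((0 : Int), (0 : Int)) then List.replicate n "steady"
     else (if prev ≠ none ∧ prev ≠ some ((0 : Int), (0 : Int)) then "turn" else "straight")
            :: List.replicate (n - 1) "straight")
      ++ pvEmit (some h) rest

def classify_motion_timeline_alt (timeline : List (Int × Int)) : List String :=
  pvEmit none (pvRle (pvHeadings timeline))

-- ===== PRECONDITION & SPEC =====
def Spec_classify_motion_timeline (timeline : List (Int × Int)) (out : List String) : Prop := out = classify_motion_timeline_alt timeline
instance (timeline : List (Int × Int)) (out : List String) : Decidable (Spec_classify_motion_timeline timeline out) := by unfold Spec_classify_motion_timeline; infer_instance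

-- ===== CLAIM (what is proved, stated in full; the proofs are below) =====
def Claim_equal_classify_motion_timeline : Prop := ∀ (timeline : List (Int × Int)), Dom_classify_motion_timeline timeline → Spec_classify_motion_timeline timeline (classify_motion_timeline timeline)

-- ===== LEMMAS AND PROOFS =====

-- per-index value of A's loop body at 0-based step index k
def pvAStep (tl : List (Int × Int)) (k : Nat) : String :=
  let pp := tl.getD k ((0 : Int), (0 : Int))
  let pc := tl.getD (k + 1) ((0 : Int), (0 : Int))
  if pc.1 != pp.1 || pc.2 != pp.2 then
    if 1 ≤ k then
      let p2 := tl.getD (k - 1) ((0 : Int), (0 : Int))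
      if pp.1 != p2.1 || pp.2 != p2.2 then
        if pvHeading p2 pp != ((0 : Int), (0 : Int)) && pvHeading pp pc != ((0 : Int), (0 : Int)) && pvHeading p2 pp != pvHeading pp pc then "turn" else "straight"
      else "straight"
    else "straight"
  else "steady"

lemma A_eq_map (tl : List (Int × Int)) :
    classify_motion_timeline tl = (List.range (tl.length - 1)).map (pvAStep tl) := by
  simp only [classify_motion_timeline]
  have h1 : ((tl.length : Int) - 1 + 1) = (tl.length : Int) := by ring
  rw [h1, PySem.List.pyRange_one]
  have h2 : ((tl.length : Int) - 1).toNat = tl.length - 1 := by omega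
  rw [h2, List.foldl_map]
  rw [PySem.List.foldl_congr_mem' _ _ (fun (acc : List String) (k : Nat) => acc ++ [pvAStep tl k]) _ ?hcong]
  case hcong =>
    intro k hk acc
    have hk' : k < tl.length - 1 := List.mem_range.mp hk
    have hkl : k < tl.length := by omega
    have hk1 : k + 1 < tl.length := by omega
    have e1 : (1 : Int) + (k : Int) - 1 = ((k : Nat) : Int) := by ring
    have e2 : (1 : Int) + (k : Int) = (((k + 1 : Nat)) : Int) := by push_cast; ring
    rw [e1, e2, PySem.List.pyGet?_natCast, PySem.List.pyGet?_natCast,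
      List.getElem?_eq_getElem hkl, List.getElem?_eq_getElem hk1]
    show _ = acc ++ [pvAStep tl k]
    by_cases hk0 : 1 ≤ k
    · have e3 : ((k + 1 : Nat) : Int) - 2 = (((k - 1 : Nat)) : Int) := by omega
      have hkm : k - 1 < tl.length := by omega
      simp only [e3, PySem.List.pyGet?_natCast, List.getElem?_eq_getElem hkm]
      have hgi : ((k : Int) ≥ 1) := by omega
      simp only [pvAStep, List.getD_eq_getElem _ _ hkl, List.getD_eq_getElem _ _ hk1,
        List.getD_eq_getElem _ _ hkm, if_pos hgi, if_pos hk0]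
      split_ifs <;> rfl
    · have hgi : ¬ ((k : Int) ≥ 1) := by omega
      simp only [pvAStep, List.getD_eq_getElem _ _ hkl, List.getD_eq_getElem _ _ hk1,
        if_neg hgi, if_neg hk0]
      split_ifs <;> rfl
  rw [PySem.List.foldl_append_singleton_eq_map]
  simp

-- proof-side per-heading labelling (the semantics both decompositions realise)
def pvLabel (prev : Option (Int × Int)) (h : Int × Int) : String :=
  if h = ((0 : Int), (0 : Int)) then "steady"
  else match prev with
    | none => "straight"
    | some hp => if hp = ((0 : Int), (0 : Int)) then "straight"
                 else if hp ≠ h then "turn" else "straight"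

def pvLabels (prev : Option (Int × Int)) : List (Int × Int) → List String
  | [] => []
  | h :: rest => pvLabel prev h :: pvLabels (some h) rest

lemma labels_run (h : Int × Int) (pre suf : List (Int × Int))
    (hpre : ∀ x ∈ pre, x = h) :
    pvLabels (some h) (pre ++ suf)
      = List.replicate pre.length (if h = ((0 : Int), (0 : Int)) then "steady" else "straight")
        ++ pvLabels (some h) suf := by
  induction pre with
  | nil => simp
  | cons x pre ih =>
    have hx : x = h := hpre x (by simp)
    rw [hx]
    simp only [List.cons_append, pvLabels]
    refine List.cons_eq_cons.mpr ⟨?_, ih (fun y hy => hpre y (by simp [hy]))⟩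
    by_cases h0 : h = ((0 : Int), (0 : Int)) <;> simp [pvLabel, h0]

lemma emit_rle (hs : List (Int × Int)) (prev : Option (Int × Int))
    (hp : ∀ a, hs.head? = some a → prev ≠ some a) :
    pvEmit prev (pvRle hs) = pvLabels prev hs := by
  match hs with
  | [] => simp only [pvRle, pvEmit, pvLabels]
  | h :: rest =>
    rw [show pvRle (h :: rest) = (h, 1 + (rest.takeWhile (· == h)).length) :: pvRle (rest.dropWhile (· == h)) from by rw [pvRle]]
    have hsplit : rest.takeWhile (· == h) ++ rest.dropWhile (· == h) = rest :=
      List.takeWhile_append_dropWhile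
    have hpre : ∀ x ∈ rest.takeWhile (· == h), x = h := by
      intro x hx
      have := List.mem_takeWhile_imp hx
      simpa using this
    have hdrop : ∀ a, (rest.dropWhile (· == h)).head? = some a → (some h : Option (Int × Int)) ≠ some a := by
      intro a ha hcontra
      have : ¬ ((· == h) a = true) := by
        have := List.head?_dropWhile_not (· == h) rest
        rw [ha] at this
        simpa using this
      simp at this
      exact this (by injection hcontra with e; exact e.symm)
    have ih := emit_rle (rest.dropWhile (· == h)) (some h) hdrop
    rw [pvEmit, ih, ← hsplit, pvLabels,
      labels_run h (rest.takeWhile (· == h)) (rest.dropWhile (· == h)) hpre]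
    by_cases h0 : h = ((0 : Int), (0 : Int))
    · simp only [if_pos h0]
      have hlab : pvLabel prev h = "steady" := by simp [pvLabel, h0]
      simp [hlab, Nat.one_add, List.replicate_succ]
    · simp only [if_neg h0]
      have hlab : pvLabel prev h
          = (if prev ≠ none ∧ prev ≠ some ((0 : Int), (0 : Int)) then "turn" else "straight") := by
        match prev with
        | none => simp [pvLabel, h0]
        | some hp' =>
          have hne : hp' ≠ h := by
            intro e
            exact hp h rfl (by rw [e])
          by_cases hz : hp' = ((0 : Int), (0 : Int)) <;> simp [pvLabel, h0, hz, hne]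
      simp [hlab]
termination_by hs.length
decreasing_by
  simpa [Nat.lt_succ_iff] using List.length_dropWhile_le (· == h) rest

lemma headings_eq_map (tl : List (Int × Int)) :
    pvHeadings tl = (List.range (tl.length - 1)).map
      (fun k => pvHeading (tl.getD k ((0 : Int), (0 : Int))) (tl.getD (k + 1) ((0 : Int), (0 : Int)))) := by
  match tl with
  | [] => simp [pvHeadings]
  | [a] => simp [pvHeadings]
  | a :: b :: rest =>
    have ih := headings_eq_map (b :: rest)
    simp only [pvHeadings, List.length_cons, Nat.add_sub_cancel, List.range_succ_eq_map,
      List.map_cons, List.map_map]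
    refine List.cons_eq_cons.mpr ⟨?_, ?_⟩
    · simp [pvHeading]
    · rw [ih]
      simp only [List.length_cons, Nat.add_sub_cancel]
      congr 1

lemma labels_eq_map (hs : List (Int × Int)) (prev : Option (Int × Int)) :
    pvLabels prev hs = (List.range hs.length).map
      (fun k => pvLabel (if k = 0 then prev else some (hs.getD (k - 1) ((0 : Int), (0 : Int)))) (hs.getD k ((0 : Int), (0 : Int)))) := by
  induction hs generalizing prev with
  | nil => simp [pvLabels]
  | cons h rest ih =>
    simp only [pvLabels, List.length_cons, List.range_succ_eq_map, List.map_cons, List.map_map]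
    refine List.cons_eq_cons.mpr ⟨?_, ?_⟩
    · simp
    · rw [ih (some h)]
      congr 1
      funext k
      cases k <;> simp

lemma point_first (pp pc : Int × Int) :
    (if pc.1 != pp.1 || pc.2 != pp.2 then "straight" else "steady")
      = pvLabel none (pvHeading pp pc) := by
  simp only [pvLabel, pvHeading, Prod.mk.injEq, sub_eq_zero]
  by_cases h1 : pc.1 = pp.1 <;> by_cases h2 : pc.2 = pp.2 <;> simp [h1, h2]

lemma point_later (p2 pp pc : Int × Int) :
    (if pc.1 != pp.1 || pc.2 != pp.2 then
      (if pp.1 != p2.1 || pp.2 != p2.2 then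
        (if pvHeading p2 pp != ((0 : Int), (0 : Int)) && pvHeading pp pc != ((0 : Int), (0 : Int)) && pvHeading p2 pp != pvHeading pp pc then "turn" else "straight")
       else "straight")
     else "steady")
      = pvLabel (some (pvHeading p2 pp)) (pvHeading pp pc) := by
  simp only [pvLabel, pvHeading, Prod.mk.injEq, bne_iff_ne, ne_eq, sub_eq_zero, Bool.and_eq_true]
  by_cases h1 : pc.1 = pp.1 <;> by_cases h2 : pc.2 = pp.2 <;>
    by_cases h3 : pp.1 = p2.1 <;> by_cases h4 : pp.2 = p2.2 <;>
    simp [h1, h2, h3, h4, sub_eq_zero] <;> split_ifs <;> simp_all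

lemma B_eq_map (tl : List (Int × Int)) :
    classify_motion_timeline_alt tl = (List.range (tl.length - 1)).map (pvAStep tl) := by
  unfold classify_motion_timeline_alt
  rw [emit_rle _ _ (by intro a _ h; cases h)]
  rw [labels_eq_map, headings_eq_map]
  simp only [List.length_map, List.length_range]
  apply List.map_congr_left
  intro k hk
  have hk' : k < tl.length - 1 := List.mem_range.mp hk
  rw [PySem.List.getD_map_range _ _ _ _ hk']
  by_cases hk0 : k = 0
  · subst hk0
    simp only [pvAStep, if_neg (by omega : ¬ (1 ≤ 0))]
    exact (point_first _ _).symm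
  · have hkm : k - 1 < tl.length - 1 := by omega
    rw [if_neg hk0, PySem.List.getD_map_range _ _ _ _ hkm]
    have hm : k - 1 + 1 = k := by omega
    rw [hm]
    simp only [pvAStep, if_pos (by omega : 1 ≤ k)]
    exact (point_later _ _ _).symm

-- ===== VERDICT (by name: the statement is the Claim_ definition above) =====
theorem classify_motion_timeline_spec : Claim_equal_classify_motion_timeline := by
  intro tl _
  unfold Spec_classify_motion_timeline
  rw [A_eq_map, B_eq_map]
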